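-- pv_equiv track=rewrite | github.com/KarlenS/AoC | day4.py | check_criteria
-- ===== SOURCE A (Python) =====
-- from collections import Counter
--
-- def check_criteria(number: int) -> bool:
--
--     numberlist = [i for i in str(number)]
--     #is 6 digit
--     is_sixdigit = len(numberlist) == 6
--
--     notwithlargergroup = 2 in Counter(numberlist).values()
--
--     adjacent = False
--     nondecreasing = True
--
--     ldig = numberlist[0]
--     for rdig in numberlist[1:]:
--         if int(ldig) > int(rdig):
--             nondecreasing = False
--         if ldig == rdig:
--             adjacent = True
--
--         ldig = rdig
--
--
--     #return is_sixdigit and adjacent and nondecreasing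
--     #return adjacent and nondecreasing #part 1
--     return adjacent and nondecreasing and notwithlargergroup
-- ===== SOURCE B (Python) =====
-- from itertools import groupby
--
-- def check_criteria(number: int) -> bool:
--     s = str(number)
--     runs = [len(list(g)) for _, g in groupby(s)]
--     return all(a <= b for a, b in zip(s, s[1:])) and 2 in runs
-- ===== Notes on version B (the rewrite author's own statement) =====
-- stated objective: idiomatic
-- what changed: Replaces A's single flag-tracking pass plus a Counter of digit multiplicities by the idiomatic decomposition: itertools.groupby run lengths plus an all() monotonicity test over zip(s, s[1:]).
import Mathlib
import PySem

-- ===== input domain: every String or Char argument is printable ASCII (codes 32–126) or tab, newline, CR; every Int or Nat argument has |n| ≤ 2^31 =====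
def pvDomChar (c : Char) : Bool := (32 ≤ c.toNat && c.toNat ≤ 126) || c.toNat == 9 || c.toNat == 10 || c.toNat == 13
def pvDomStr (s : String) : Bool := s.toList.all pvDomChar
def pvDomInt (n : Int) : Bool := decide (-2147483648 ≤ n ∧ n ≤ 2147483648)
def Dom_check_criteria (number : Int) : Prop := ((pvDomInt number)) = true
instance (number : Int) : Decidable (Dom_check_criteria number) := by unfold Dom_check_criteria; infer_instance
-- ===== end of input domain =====

-- B replaces A's flag-tracking digit loop plus Counter by an itertools.groupby run-length
-- decomposition with a zip-adjacent monotonicity test (objective: idiomatic; same cost).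

-- ===== PORT A =====
-- int(ldig) for a one-character string ldig; inside Pre_ every character is a decimal
-- digit, so ofChars? is always `some` and the getD default is never reached.
def pvIntOf (c : Char) : Int := (PySem.Int.ofChars? [c]).getD 0

def check_criteria (number : Int) : Bool :=
  let numberlist := PySem.Int.toChars number
  let _is_sixdigit := numberlist.length == 6   -- computed by A, unused (commented-out return)
  let notwithlargergroup := (PySem.Dict.counter numberlist).values.contains (2 : Int)
  match numberlist with
  | [] => false                                -- unreachable: str(number) is never empty
  | ldig0 :: rest =>
    let st := rest.foldl (fun (st : Bool × Bool × Char) rdig =>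
      let adjacent := st.1
      let nondecreasing := st.2.1
      let ldig := st.2.2
      let nondecreasing := if pvIntOf ldig > pvIntOf rdig then false else nondecreasing
      let adjacent := if ldig == rdig then true else adjacent
      (adjacent, nondecreasing, rdig)) (false, true, ldig0)
    st.1 && st.2.1 && notwithlargergroup

-- ===== PORT B =====
-- run lengths of itertools.groupby(s), ported by hand (no PySem primitive); exact.
def pvRunsGo : Char → Int → List Char → List Int
  | _, k, [] => [k]
  | c, k, d :: rest => if d == c then pvRunsGo c (k + 1) rest else k :: pvRunsGo d 1 rest

def pvRunLengths : List Char → List Int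
  | [] => []
  | c :: rest => pvRunsGo c 1 rest

def check_criteria_alt (number : Int) : Bool :=
  let s := PySem.Int.toChars number
  let runs := pvRunLengths s
  ((s.zip (PySem.List.slice s (some 1) none)).all fun p => decide (p.1 ≤ p.2)) && runs.contains (2 : Int)

-- ===== PRECONDITION & SPEC =====
-- Pre_ excludes exactly the negative inputs: there str(number) starts with '-' and
-- A raises ValueError at int('-').
def Pre_check_criteria (number : Int) : Prop := 0 ≤ number
instance (number : Int) : Decidable (Pre_check_criteria number) := by unfold Pre_check_criteria; infer_instance
def pvWitness_check_criteria : Int := (112233)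

def Spec_check_criteria (number : Int) (out : Bool) : Prop := out = check_criteria_alt number
instance (number : Int) (out : Bool) : Decidable (Spec_check_criteria number out) := by unfold Spec_check_criteria; infer_instance

-- ===== CLAIM (what is proved, stated in full; the proofs are below) =====
def Claim_equal_check_criteria : Prop := ∀ (number : Int), Dom_check_criteria number → Pre_check_criteria number → Spec_check_criteria number (check_criteria number)

-- ===== LEMMAS AND PROOFS =====

-- the ten decimal digit characters
def pvDigits : List Char := ['0', '1', '2', '3', '4', '5', '6', '7', '8', '9']

-- "some adjacent pair is equal" (A's `adjacent` flag, as a predicate)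
def adjB : List Char → Bool
  | x :: y :: t => (x == y) || adjB (y :: t)
  | _ => false

-- "no adjacent pair decreases", via int() values (A's `nondecreasing` flag)
def ndB : List Char → Bool
  | x :: y :: t => !(decide (pvIntOf x > pvIntOf y)) && ndB (y :: t)
  | _ => true

-- "no adjacent pair decreases", via character order (B's test)
def leB : List Char → Bool
  | x :: y :: t => decide (x ≤ y) && leB (y :: t)
  | _ => true

theorem digitChar_mem (m : Nat) (h : m < 10) : m.digitChar ∈ pvDigits := by
  interval_cases m <;> decide

theorem toDigitsCore_digits :
    ∀ (fuel n : Nat) (acc : List Char), (∀ c ∈ acc, c ∈ pvDigits) →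
      ∀ c ∈ Nat.toDigitsCore 10 fuel n acc, c ∈ pvDigits := by
  intro fuel
  induction fuel with
  | zero => intro n acc hacc; simpa [Nat.toDigitsCore] using hacc
  | succ fuel ih =>
    intro n acc hacc c hc
    rw [Nat.toDigitsCore] at hc
    by_cases h0 : n / 10 = 0
    · simp only [h0, if_pos] at hc
      rcases List.mem_cons.mp hc with h | h
      · exact h ▸ digitChar_mem _ (Nat.mod_lt _ (by omega))
      · exact hacc _ h
    · simp only [if_neg h0] at hc
      refine ih (n / 10) _ ?_ c hc
      intro d hd
      rcases List.mem_cons.mp hd with h | h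
      · exact h ▸ digitChar_mem _ (Nat.mod_lt _ (by omega))
      · exact hacc _ h

theorem toDigitsCore_ne_nil_of_acc :
    ∀ (fuel n : Nat) (acc : List Char), acc ≠ [] → Nat.toDigitsCore 10 fuel n acc ≠ [] := by
  intro fuel
  induction fuel with
  | zero => intro n acc h; simpa [Nat.toDigitsCore] using h
  | succ fuel ih =>
    intro n acc h
    rw [Nat.toDigitsCore]
    by_cases h0 : n / 10 = 0
    · simp [h0]
    · simpa [h0] using ih (n / 10) _ (by simp)

theorem toDigits_ne_nil (n : Nat) : Nat.toDigits 10 n ≠ [] := by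
  rw [Nat.toDigits, Nat.toDigitsCore]
  by_cases h0 : n / 10 = 0
  · simp [h0]
  · simpa [h0] using toDigitsCore_ne_nil_of_acc n (n / 10) _ (by simp)

theorem toDigits_digits (n : Nat) : ∀ c ∈ Nat.toDigits 10 n, c ∈ pvDigits :=
  toDigitsCore_digits (n + 1) n [] (by simp)

-- on digit characters, A's int() comparison is B's character comparison
theorem pvIntOf_gt_iff (c d : Char) (hc : c ∈ pvDigits) (hd : d ∈ pvDigits) :
    decide (pvIntOf c > pvIntOf d) = !decide (c ≤ d) := by
  fin_cases hc <;> fin_cases hd <;> decide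

-- A's loop, characterised: the two flags plus the trailing character
theorem foldA :
    ∀ (rest : List Char) (c : Char) (a n : Bool),
      rest.foldl (fun (st : Bool × Bool × Char) rdig =>
        (if st.2.2 == rdig then true else st.1,
         if pvIntOf st.2.2 > pvIntOf rdig then false else st.2.1,
         rdig)) (a, n, c)
      = (a || adjB (c :: rest), n && ndB (c :: rest), rest.getLastD c) := by
  intro rest
  induction rest with
  | nil => intro c a n; simp [adjB, ndB]
  | cons d rest ih =>
    intro c a n
    simp only [List.foldl_cons, ih, adjB, ndB, List.getLastD_cons, Prod.mk.injEq]
    refine ⟨?_, ?_, trivial⟩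
    · cases c == d <;> cases a <;> simp
    · by_cases h : pvIntOf c > pvIntOf d <;> cases n <;> simp [h]

-- B's zip-adjacent test is leB
theorem zip_all_eq_leB :
    ∀ (l : List Char), ((l.zip l.tail).all fun p => decide (p.1 ≤ p.2)) = leB l := by
  intro l
  induction l with
  | nil => rfl
  | cons x t ih =>
    cases t with
    | nil => rfl
    | cons y t' =>
      simp only [List.tail_cons] at ih
      simp only [List.zip_cons_cons, List.all_cons, List.tail_cons, leB, ih]

theorem ndB_eq_leB : ∀ (l : List Char), (∀ c ∈ l, c ∈ pvDigits) → ndB l = leB l := by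
  intro l
  induction l with
  | nil => intro _; rfl
  | cons x t ih =>
    intro h
    cases t with
    | nil => rfl
    | cons y t' =>
      rw [ndB, leB, pvIntOf_gt_iff x y (h x (by simp)) (h y (by simp)),
        ih (fun c hc => h c (List.mem_cons_of_mem _ hc)), Bool.not_not]

theorem leB_iff_pairwise : ∀ (l : List Char), leB l = true ↔ l.Pairwise (· ≤ ·) := by
  intro l
  induction l with
  | nil => simp [leB]
  | cons x t ih =>
    cases t with
    | nil => simp [leB]
    | cons y t' =>
      rw [leB, Bool.and_eq_true, decide_eq_true_iff, ih, List.pairwise_cons (l := y :: t')]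
      constructor
      · rintro ⟨hxy, hyt⟩
        refine ⟨fun e he => ?_, hyt⟩
        rcases List.mem_cons.mp he with rfl | he
        · exact hxy
        · exact le_trans hxy ((List.pairwise_cons.mp hyt).1 e he)
      · rintro ⟨hx, hyt⟩
        exact ⟨hx y (by simp), hyt⟩

-- 2 ∈ Counter(l).values() ↔ some character occurs exactly twice
theorem counter_values_two (l : List Char) :
    ((PySem.Dict.counter l).values.contains (2 : Int) = true) ↔ ∃ k ∈ l, l.count k = 2 := by
  rw [List.contains_iff_mem]
  simp only [PySem.Dict.values, PySem.Dict.items_counter, List.map_map]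
  simp only [List.mem_map, Function.comp]
  constructor
  · rintro ⟨k, hk, hv⟩
    exact ⟨k, (PySem.Set.mem_ofList l k).mp hk, by exact_mod_cast hv⟩
  · rintro ⟨k, hk, hv⟩
    exact ⟨k, (PySem.Set.mem_ofList l k).mpr hk, by exact_mod_cast hv⟩

-- a run longer than the count it started from forces an adjacent equal pair
theorem adjB_of_run :
    ∀ (rest : List Char) (c : Char) (k : Int), 1 ≤ k →
      (∃ x ∈ pvRunsGo c k rest, k < x) → adjB (c :: rest) = true := by
  intro rest
  induction rest with
  | nil =>
    rintro c k _ ⟨x, hx, hlt⟩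
    simp only [pvRunsGo, List.mem_singleton] at hx
    omega
  | cons d rest ih =>
    rintro c k hk ⟨x, hx, hlt⟩
    by_cases hdc : d = c
    · subst hdc; simp [adjB]
    · rw [pvRunsGo, if_neg (by simpa using hdc)] at hx
      rcases List.mem_cons.mp hx with rfl | hx
      · omega
      · have : adjB (d :: rest) = true := ih d 1 le_rfl ⟨x, hx, by omega⟩
        simp [adjB, this]
    
-- on a sorted list, the run lengths are exactly the multiplicities
theorem runsGo_two :
    ∀ (rest : List Char) (c : Char) (k : Int), 1 ≤ k → (c :: rest).Pairwise (· ≤ ·) →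
      ((pvRunsGo c k rest).contains (2 : Int) = true ↔
        (k + (rest.count c : Int) = 2 ∨ ∃ d ∈ rest, d ≠ c ∧ rest.count d = 2)) := by
  intro rest
  induction rest with
  | nil =>
    intro c k _ _
    simp only [pvRunsGo, List.contains_iff_mem, List.mem_singleton, List.count_nil]
    constructor
    · intro h; left; omega
    · rintro (h | ⟨d, hd, _⟩)
      · omega
      · simp at hd
  | cons d rest ih =>
    intro c k hk hpw
    have hpw' : (d :: rest).Pairwise (· ≤ ·) := (List.pairwise_cons.mp hpw).2
    by_cases hdc : d = c
    · subst hdc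
      rw [pvRunsGo, if_pos (by simp)]
      rw [ih d (k + 1) (by omega) hpw']
      constructor
      · rintro (h | ⟨e, he, hec, hcnt⟩)
        · left
          rw [List.count_cons_self]
          push_cast
          omega
        · right
          refine ⟨e, List.mem_cons_of_mem _ he, hec, ?_⟩
          rw [List.count_cons, if_neg (by simpa using (Ne.symm hec))]
          omega
      · rintro (h | ⟨e, he, hec, hcnt⟩)
        · left
          rw [List.count_cons_self] at h
          push_cast at h ⊢
          omega
        · rcases List.mem_cons.mp he with rfl | he
          · exact absurd rfl hec
          · right
            refine ⟨e, he, hec, ?_⟩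
            rw [List.count_cons, if_neg (by simpa using (Ne.symm hec))] at hcnt
            omega
    · -- c < d, hence c occurs nowhere in d :: rest
      have hcd : c ≤ d := (List.pairwise_cons.mp hpw).1 d (by simp)
      have hnotmem : c ∉ d :: rest := by
        intro hmem
        rcases List.mem_cons.mp hmem with rfl | hmem
        · exact hdc rfl
        · exact hdc (le_antisymm ((List.pairwise_cons.mp hpw').1 c hmem) hcd)
      have hcnt0 : (d :: rest).count c = 0 := List.count_eq_zero.mpr hnotmem
      have hrec := ih d 1 le_rfl hpw'
      rw [pvRunsGo, if_neg (by simpa using hdc), List.contains_cons, Bool.or_eq_true, beq_iff_eq]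
      constructor
      · rintro (h2k | hmem)
        · left; rw [hcnt0]; push_cast; omega
        · rcases hrec.mp hmem with h | ⟨e, he, hed, hcnt⟩
          · right
            refine ⟨d, by simp, hdc, ?_⟩
            rw [List.count_cons_self]
            omega
          · right
            refine ⟨e, List.mem_cons_of_mem _ he, fun hec => hnotmem (hec ▸ List.mem_cons_of_mem _ he), ?_⟩
            rw [List.count_cons, if_neg (by simpa using (Ne.symm hed))]
            exact hcnt
      · rintro (h | ⟨e, he, hec, hcnt⟩)
        · left
          rw [hcnt0] at h
          omega
        · by_cases hed : e = d
          · subst hed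
            rw [List.count_cons_self] at hcnt
            right
            exact hrec.mpr (Or.inl (by omega))
          · rcases List.mem_cons.mp he with rfl | he'
            · exact absurd rfl hed
            · right
              refine hrec.mpr (Or.inr ⟨e, he', hed, ?_⟩)
              rw [List.count_cons, if_neg (by simpa using (Ne.symm hed))] at hcnt
              exact hcnt

theorem runs_two (l : List Char) (hpw : l.Pairwise (· ≤ ·)) :
    ((pvRunLengths l).contains (2 : Int) = true) ↔ ∃ k ∈ l, l.count k = 2 := by
  cases l with
  | nil => simp [pvRunLengths]
  | cons c rest =>
    rw [pvRunLengths, runsGo_two rest c 1 le_rfl hpw]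
    constructor
    · rintro (h | ⟨d, hd, hdc, hcnt⟩)
      · refine ⟨c, by simp, ?_⟩
        rw [List.count_cons_self]
        omega
      · refine ⟨d, List.mem_cons_of_mem _ hd, ?_⟩
        rw [List.count_cons, if_neg (by simpa using (Ne.symm hdc))]
        exact hcnt
    · rintro ⟨k, hkmem, hcnt⟩
      by_cases hkc : k = c
      · subst hkc
        rw [List.count_cons_self] at hcnt
        left
        omega
      · rcases List.mem_cons.mp hkmem with rfl | hkmem
        · exact absurd rfl hkc
        · right
          refine ⟨k, hkmem, hkc, ?_⟩
          rw [List.count_cons, if_neg (by simpa using (Ne.symm hkc))] at hcnt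
          exact hcnt

-- ===== VERDICT (by name: the statement is the Claim_ definition above) =====
theorem check_criteria_spec : Claim_equal_check_criteria := by
  intro number _ hpre
  have h0 : (0 : Int) ≤ number := hpre
  unfold Spec_check_criteria
  have htc : PySem.Int.toChars number = Nat.toDigits 10 number.toNat := by
    rw [PySem.Int.toChars, if_neg (by omega)]
  obtain ⟨c, rest, hcons⟩ : ∃ c rest, PySem.Int.toChars number = c :: rest := by
    rcases h : Nat.toDigits 10 number.toNat with _ | ⟨c, rest⟩
    · exact absurd h (toDigits_ne_nil _)
    · exact ⟨c, rest, htc.trans h⟩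
  have hdig : ∀ ch ∈ c :: rest, ch ∈ pvDigits := by
    rw [← hcons, htc]; exact toDigits_digits _
  simp only [check_criteria, check_criteria_alt, hcons]
  have hslice : PySem.List.slice (c :: rest) (some 1) none = rest := by
    rw [PySem.List.slice_from _ (by omega)]
    simp
  rw [hslice]
  have hzip := zip_all_eq_leB (c :: rest)
  simp only [List.tail_cons] at hzip
  rw [hzip, foldA rest c false true]
  simp only [Bool.false_or, Bool.true_and]
  have hle := ndB_eq_leB (c :: rest) hdig
  by_cases hnd : ndB (c :: rest) = true
  · have hpw : (c :: rest).Pairwise (· ≤ ·) := (leB_iff_pairwise _).mp (hle ▸ hnd)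
    have hiff := runs_two (c :: rest) hpw
    by_cases hruns : (pvRunLengths (c :: rest)).contains (2 : Int) = true
    · have hcv := (counter_values_two (c :: rest)).mpr (hiff.mp hruns)
      have hadj : adjB (c :: rest) = true :=
        adjB_of_run rest c 1 le_rfl
          ⟨2, by simpa [pvRunLengths] using List.contains_iff_mem.mp hruns, by omega⟩
      rw [← hle, hadj, hnd, hcv, hruns]
      rfl
    · have hcv : ¬ (PySem.Dict.counter (c :: rest)).values.contains (2 : Int) = true :=
        fun h => hruns (hiff.mpr ((counter_values_two _).mp h))
      rw [Bool.not_eq_true] at hcv hruns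
      rw [hcv, hruns]
      simp
  · rw [Bool.not_eq_true] at hnd
    rw [← hle, hnd]
    simp
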